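-- pv_equiv track=rewrite | github.com/WaterMelon272/project-2048-ai | backend/app/backup_original/heuristics.py | calculate_monotonicity
-- ===== SOURCE A (Python) =====
-- def calculate_monotonicity(grid):
--     totals = [0, 0, 0, 0] # Up, Down, Left, Right
--
--     # Trái/Phải
--     for r in range(4):
--         current = 0
--         next_val = 0
--         for c in range(3):
--             current = grid[r][c]
--             next_val = grid[r][c+1]
--             if current > next_val:
--                 totals[0] += next_val - current # Giảm dần
--             elif next_val > current:
--                 totals[1] += current - next_val # Tăng dần
--
--     # Lên/Xuống
--     for c in range(4):
--         for r in range(3):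
--             current = grid[r][c]
--             next_val = grid[r+1][c]
--             if current > next_val:
--                 totals[2] += next_val - current
--             elif next_val > current:
--                 totals[3] += current - next_val
--
--     return max(totals[0], totals[1]) + max(totals[2], totals[3])
-- ===== SOURCE B (Python) =====
-- def _axis_score(lines):
--     # max(dec, inc) in closed form: dec - inc telescopes to sum(last - first),
--     # dec + inc = -sum(|adjacent diffs|), so max = (|drift| - total) // 2 (always even).
--     drift = sum(line[3] - line[0] for line in lines)
--     total = sum(abs(line[c + 1] - line[c]) for line in lines for c in range(3))
--     return (abs(drift) - total) // 2
--
--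
-- def calculate_monotonicity(grid):
--     rows = [[grid[r][c] for c in range(4)] for r in range(4)]
--     cols = [[grid[r][c] for r in range(4)] for c in range(4)]
--     return _axis_score(rows) + _axis_score(cols)
-- ===== Notes on version B (the rewrite author's own statement) =====
-- stated objective: alternative
-- what changed: Replaces A's pair-by-pair branching into four running totals and per-axis max by a closed form: per axis the decreasing/increasing sums differ by a telescoping drift sum(line[3]-line[0]) and add up to minus the total of |adjacent differences|, so each axis contributes (abs(drift) - total)//2.
import Mathlib
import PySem

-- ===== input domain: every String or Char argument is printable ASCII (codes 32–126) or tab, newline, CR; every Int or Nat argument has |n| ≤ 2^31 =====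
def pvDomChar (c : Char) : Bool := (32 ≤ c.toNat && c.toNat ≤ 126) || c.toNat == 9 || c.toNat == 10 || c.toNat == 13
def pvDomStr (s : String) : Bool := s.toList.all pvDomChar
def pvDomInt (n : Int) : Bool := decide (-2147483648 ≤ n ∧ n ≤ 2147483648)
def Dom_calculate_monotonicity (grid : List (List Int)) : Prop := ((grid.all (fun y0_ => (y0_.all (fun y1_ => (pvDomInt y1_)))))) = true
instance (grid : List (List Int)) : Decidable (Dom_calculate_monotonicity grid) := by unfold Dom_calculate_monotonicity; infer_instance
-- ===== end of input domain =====

-- B replaces A's pair-by-pair branching into four running totals by a closed form per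
-- axis: the decreasing/increasing sums differ by a telescoping drift sum(last-first)
-- and add up to -sum(|adjacent diffs|), so max(dec,inc) = (|drift| - total) // 2
-- (objective: alternative — a different algorithm of the same cost).

-- ===== PORT A =====
-- grid[r][c]; inside Pre_ both indices are always in range, so the default is never used
def pvGetA (grid : List (List Int)) (r c : Int) : Int :=
  ((PySem.List.pyGet? grid r).bind (fun row => PySem.List.pyGet? row c)).getD 0

def calculate_monotonicity (grid : List (List Int)) : Int :=
  -- totals = [0,0,0,0], modelled as a 4-tuple (Up, Down, Left, Right)
  let t0 : Int × Int × Int × Int := (0, 0, 0, 0)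
  -- for r in range(4): for c in range(3): …
  let t1 := (PySem.List.pyRange 0 4 1).foldl (fun t r =>
      (PySem.List.pyRange 0 3 1).foldl (fun (t : Int × Int × Int × Int) c =>
        let current := pvGetA grid r c
        let next_val := pvGetA grid r (c + 1)
        if current > next_val then (t.1 + (next_val - current), t.2.1, t.2.2.1, t.2.2.2)
        else if next_val > current then (t.1, t.2.1 + (current - next_val), t.2.2.1, t.2.2.2)
        else t) t) t0
  -- for c in range(4): for r in range(3): …
  let t2 := (PySem.List.pyRange 0 4 1).foldl (fun t c =>
      (PySem.List.pyRange 0 3 1).foldl (fun (t : Int × Int × Int × Int) r =>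
        let current := pvGetA grid r c
        let next_val := pvGetA grid (r + 1) c
        if current > next_val then (t.1, t.2.1, t.2.2.1 + (next_val - current), t.2.2.2)
        else if next_val > current then (t.1, t.2.1, t.2.2.1, t.2.2.2 + (current - next_val))
        else t) t) t1
  max t2.1 t2.2.1 + max t2.2.2.1 t2.2.2.2

-- ===== PORT B =====
-- drift = sum(line[3] - line[0]); total = sum(|line[c+1] - line[c]|); (|drift| - total) // 2
def pvAxisScore (lines : List (List Int)) : Int :=
  let drift := (lines.map (fun line => PySem.List.pyGetD line 3 0 - PySem.List.pyGetD line 0 0)).sum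
  let total := (lines.flatMap (fun line =>
      (PySem.List.pyRange 0 3 1).map (fun c =>
        |PySem.List.pyGetD line (c + 1) 0 - PySem.List.pyGetD line c 0|))).sum
  PySem.Int.floordiv (|drift| - total) 2

-- rows / cols comprehensions (pvGetA is the shared grid[r][c] helper)
def calculate_monotonicity_alt (grid : List (List Int)) : Int :=
  let rows := (PySem.List.pyRange 0 4 1).map (fun r =>
      (PySem.List.pyRange 0 4 1).map (fun c => pvGetA grid r c))
  let cols := (PySem.List.pyRange 0 4 1).map (fun c =>
      (PySem.List.pyRange 0 4 1).map (fun r => pvGetA grid r c))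
  pvAxisScore rows + pvAxisScore cols

-- ===== PRECONDITION & SPEC =====
-- A indexes grid[0..3][0..3]; Pre_ excludes exactly the grids where that raises IndexError.
def Pre_calculate_monotonicity (grid : List (List Int)) : Prop :=
  4 ≤ grid.length ∧ ∀ row ∈ grid.take 4, 4 ≤ row.length
instance (grid : List (List Int)) : Decidable (Pre_calculate_monotonicity grid) := by
  unfold Pre_calculate_monotonicity; infer_instance

def pvWitness_calculate_monotonicity : List (List Int) :=
  [[2, 1, 1, 0], [4, 3, 2, 1], [0, 0, 1, 2], [5, 5, 5, 5]]

def Spec_calculate_monotonicity (grid : List (List Int)) (out : Int) : Prop := out = calculate_monotonicity_alt grid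
instance (grid : List (List Int)) (out : Int) : Decidable (Spec_calculate_monotonicity grid out) := by unfold Spec_calculate_monotonicity; infer_instance

-- ===== CLAIM (what is proved, stated in full; the proofs are below) =====
def Claim_equal_calculate_monotonicity : Prop := ∀ (grid : List (List Int)), Dom_calculate_monotonicity grid → Pre_calculate_monotonicity grid → Spec_calculate_monotonicity grid (calculate_monotonicity grid)

-- ===== LEMMAS AND PROOFS =====

lemma pyGet?_c1 {α : Type} (x0 x1 : α) (t : List α) :
    PySem.List.pyGet? (x0 :: x1 :: t) 1 = some x1 := by simp

lemma pyGet?_c2 {α : Type} (x0 x1 x2 : α) (t : List α) :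
    PySem.List.pyGet? (x0 :: x1 :: x2 :: t) 2 = some x2 := by
  have := PySem.List.pyGet?_ofNat (xs := x0 :: x1 :: x2 :: t) (n := 2) (by simp)
  simp at this; exact this

lemma pyGet?_c3 {α : Type} (x0 x1 x2 x3 : α) (t : List α) :
    PySem.List.pyGet? (x0 :: x1 :: x2 :: x3 :: t) 3 = some x3 := by
  have := PySem.List.pyGet?_ofNat (xs := x0 :: x1 :: x2 :: x3 :: t) (n := 3) (by simp)
  simp at this; exact this

lemma pyRange03 : PySem.List.pyRange 0 3 1 = [0, 1, 2] := by decide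
lemma pyRange04 : PySem.List.pyRange 0 4 1 = [0, 1, 2, 3] := by decide

-- A's per-pair update of totals[0]/totals[1], written branch-free with min
lemma stepH (t : Int × Int × Int × Int) (a b : Int) :
    (if a > b then (t.1 + (b - a), t.2.1, t.2.2.1, t.2.2.2)
     else if b > a then (t.1, t.2.1 + (a - b), t.2.2.1, t.2.2.2) else t)
    = (t.1 + min (b - a) 0, t.2.1 + min (a - b) 0, t.2.2.1, t.2.2.2) := by
  obtain ⟨x, y, z, w⟩ := t; split_ifs <;> simp <;> omega

-- A's per-pair update of totals[2]/totals[3], written branch-free with min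
lemma stepV (t : Int × Int × Int × Int) (a b : Int) :
    (if a > b then (t.1, t.2.1, t.2.2.1 + (b - a), t.2.2.2)
     else if b > a then (t.1, t.2.1, t.2.2.1, t.2.2.2 + (a - b)) else t)
    = (t.1, t.2.1, t.2.2.1 + min (b - a) 0, t.2.2.2 + min (a - b) 0) := by
  obtain ⟨x, y, z, w⟩ := t; split_ifs <;> simp <;> omega

lemma stepHfun {α : Type} (f g : α → Int) :
    (fun (t : Int × Int × Int × Int) (x : α) =>
      if f x > g x then (t.1 + (g x - f x), t.2.1, t.2.2.1, t.2.2.2)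
      else if g x > f x then (t.1, t.2.1 + (f x - g x), t.2.2.1, t.2.2.2)
      else t)
    = (fun t x => (t.1 + min (g x - f x) 0, t.2.1 + min (f x - g x) 0, t.2.2.1, t.2.2.2)) := by
  funext t x; exact stepH t (f x) (g x)

lemma stepVfun {α : Type} (f g : α → Int) :
    (fun (t : Int × Int × Int × Int) (x : α) =>
      if f x > g x then (t.1, t.2.1, t.2.2.1 + (g x - f x), t.2.2.2)
      else if g x > f x then (t.1, t.2.1, t.2.2.1, t.2.2.2 + (f x - g x))
      else t)
    = (fun t x => (t.1, t.2.1, t.2.2.1 + min (g x - f x) 0, t.2.2.2 + min (f x - g x) 0)) := by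
  funext t x; exact stepV t (f x) (g x)

-- max a b written as a half-sum, so the per-axis floor divisions can be compared directly
lemma max_half (a b : Int) : max a b = (a + b + |a - b|) / 2 := by
  rcases abs_cases (a - b) with ⟨h1, _⟩ | ⟨h1, _⟩ <;> omega

-- the fully destructured case: 16 entries plus arbitrary row tails and extra rows
set_option maxHeartbeats 4000000 in
lemma main_eq (a0 a1 a2 a3 b0 b1 b2 b3 c0 c1 c2 c3 d0 d1 d2 d3 : Int)
    (ta tb tc td : List Int) (rest : List (List Int)) :
    calculate_monotonicity
      ((a0 :: a1 :: a2 :: a3 :: ta) :: (b0 :: b1 :: b2 :: b3 :: tb) ::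
       (c0 :: c1 :: c2 :: c3 :: tc) :: (d0 :: d1 :: d2 :: d3 :: td) :: rest)
    = calculate_monotonicity_alt
      ((a0 :: a1 :: a2 :: a3 :: ta) :: (b0 :: b1 :: b2 :: b3 :: tb) ::
       (c0 :: c1 :: c2 :: c3 :: tc) :: (d0 :: d1 :: d2 :: d3 :: td) :: rest) := by
  simp only [calculate_monotonicity, calculate_monotonicity_alt, pyRange03, pyRange04]
  simp only [stepHfun (fun c => pvGetA _ _ c) (fun c => pvGetA _ _ (c + 1)),
             stepVfun (fun r => pvGetA _ r _) (fun r => pvGetA _ (r + 1) _)]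
  simp [pvAxisScore, pvGetA, PySem.List.pyGetD, pyGet?_c1, pyGet?_c2, pyGet?_c3,
        pyRange03]
  have e : ∀ x y : Int, min (x - y) 0 + min (y - x) 0 = -|x - y| := by
    intro x y; rcases abs_cases (x - y) with ⟨h1, _⟩ | ⟨h1, _⟩ <;> omega
  have f : ∀ x y : Int, min (x - y) 0 - min (y - x) 0 = x - y := fun x y => by omega
  rw [max_half, max_half]
  rw [show (min (a1 - a0) 0 + min (a2 - a1) 0 + min (a3 - a2) 0 + min (b1 - b0) 0 + min (b2 - b1) 0 + min (b3 - b2) 0 + min (c1 - c0) 0 + min (c2 - c1) 0 + min (c3 - c2) 0 + min (d1 - d0) 0 + min (d2 - d1) 0 + min (d3 - d2) 0) - (min (a0 - a1) 0 + min (a1 - a2) 0 + min (a2 - a3) 0 + min (b0 - b1) 0 + min (b1 - b2) 0 + min (b2 - b3) 0 + min (c0 - c1) 0 + min (c1 - c2) 0 + min (c2 - c3) 0 + min (d0 - d1) 0 + min (d1 - d2) 0 + min (d2 - d3) 0) = a3 - a0 + (b3 - b0 + (c3 - c0 + (d3 - d0))) by linarith [f a1 a0, f a2 a1, f a3 a2,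 f b1 b0, f b2 b1, f b3 b2, f c1 c0, f c2 c1, f c3 c2, f d1 d0, f d2 d1, f d3 d2]]
  rw [show (min (b0 - a0) 0 + min (c0 - b0) 0 + min (d0 - c0) 0 + min (b1 - a1) 0 + min (c1 - b1) 0 + min (d1 - c1) 0 + min (b2 - a2) 0 + min (c2 - b2) 0 + min (d2 - c2) 0 + min (b3 - a3) 0 + min (c3 - b3) 0 + min (d3 - c3) 0) - (min (a0 - b0) 0 + min (b0 - c0) 0 + min (c0 - d0) 0 + min (a1 - b1) 0 + min (b1 - c1) 0 + min (c1 - d1) 0 + min (a2 - b2) 0 + min (b2 - c2) 0 + min (c2 - d2) 0 + min (a3 - b3) 0 + min (b3 - c3) 0 + min (c3 - d3) 0) = d0 - a0 + (d1 - a1 + (d2 - a2 + (d3 - a3))) by linarith [f b0 a0, f c0 b0, f d0 c0, f b1 a1, f c1 b1, f d1 c1, f b2 a2, f c2 b2, f d2 c2, f b3 a3, f c3 b3, f d3 c3]]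
  rw [show (|a1 - a0| + (|a2 - a1| + (|a3 - a2| + (|b1 - b0| + (|b2 - b1| + (|b3 - b2| + (|c1 - c0| + (|c2 - c1| + (|c3 - c2| + (|d1 - d0| + (|d2 - d1| + (|d3 - d2|)))))))))))) = -((min (a1 - a0) 0 + min (a2 - a1) 0 + min (a3 - a2) 0 + min (b1 - b0) 0 + min (b2 - b1) 0 + min (b3 - b2) 0 + min (c1 - c0) 0 + min (c2 - c1) 0 + min (c3 - c2) 0 + min (d1 - d0) 0 + min (d2 - d1) 0 + min (d3 - d2) 0) + (min (a0 - a1) 0 + min (a1 - a2) 0 + min (a2 - a3) 0 + min (b0 - b1) 0 + min (b1 - b2) 0 + min (b2 - b3) 0 + min (c0 - c1) 0 + min (c1 - c2) 0 + min (c2 - c3) 0 + min (d0 - d1) 0 + min (d1 - d2) 0 + min (d2 - d3) 0)) by linarith [e a1 a0, e a2 a1, e a3 a2, e b1 b0, e b2 b1, e b3 b2, e c1 c0, e c2 c1, e c3 c2, e d1 d0, e d2 d1, e d3 d2]]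
  rw [show (|b0 - a0| + (|c0 - b0| + (|d0 - c0| + (|b1 - a1| + (|c1 - b1| + (|d1 - c1| + (|b2 - a2| + (|c2 - b2| + (|d2 - c2| + (|b3 - a3| + (|c3 - b3| + (|d3 - c3|)))))))))))) = -((min (b0 - a0) 0 + min (c0 - b0) 0 + min (d0 - c0) 0 + min (b1 - a1) 0 + min (c1 - b1) 0 + min (d1 - c1) 0 + min (b2 - a2) 0 + min (c2 - b2) 0 + min (d2 - c2) 0 + min (b3 - a3) 0 + min (c3 - b3) 0 + min (d3 - c3) 0) + (min (a0 - b0) 0 + min (b0 - c0) 0 + min (c0 - d0) 0 + min (a1 - b1) 0 + min (b1 - c1) 0 + min (c1 - d1) 0 + min (a2 - b2) 0 + min (b2 - c2) 0 + min (c2 - d2) 0 + min (a3 - b3) 0 + min (b3 - c3) 0 + min (c3 - d3) 0)) by linarith [e b0 a0, e c0 b0, e d0 c0, e b1 a1, e c1 b1, e d1 c1, e b2 a2, e c2 b2, e d2 c2, e b3 a3, e c3 b3, e d3 c3]]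
  rw [show |a3 - a0 + (b3 - b0 + (c3 - c0 + (d3 - d0)))| - -((min (a1 - a0) 0 + min (a2 - a1) 0 + min (a3 - a2) 0 + min (b1 - b0) 0 + min (b2 - b1) 0 + min (b3 - b2) 0 + min (c1 - c0) 0 + min (c2 - c1) 0 + min (c3 - c2) 0 + min (d1 - d0) 0 + min (d2 - d1) 0 + min (d3 - d2) 0) + (min (a0 - a1) 0 + min (a1 - a2) 0 + min (a2 - a3) 0 + min (b0 - b1) 0 + min (b1 - b2) 0 + min (b2 - b3) 0 + min (c0 - c1) 0 + min (c1 - c2) 0 + min (c2 - c3) 0 + min (d0 - d1) 0 + min (d1 - d2) 0 + min (d2 - d3) 0)) = (min (a1 - a0) 0 + min (a2 - a1) 0 + min (a3 - a2) 0 + min (b1 - b0) 0 + min (b2 - b1) 0 + min (b3 - b2) 0 + min (c1 - c0) 0 + min (c2 - c1) 0 + min (c3 - c2) 0 + min (d1 - d0) 0 + min (d2 - d1) 0 + min (d3 - d2) 0) + (min (a0 - a1) 0 + min (a1 - a2) 0 + min (a2 - a3) 0 + min (b0 - b1) 0 + min (b1 - b2) 0 + min (b2 - b3) 0 + min (c0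 - c1) 0 + min (c1 - c2) 0 + min (c2 - c3) 0 + min (d0 - d1) 0 + min (d1 - d2) 0 + min (d2 - d3) 0) + |a3 - a0 + (b3 - b0 + (c3 - c0 + (d3 - d0)))| by ring]
  rw [show |d0 - a0 + (d1 - a1 + (d2 - a2 + (d3 - a3)))| - -((min (b0 - a0) 0 + min (c0 - b0) 0 + min (d0 - c0) 0 + min (b1 - a1) 0 + min (c1 - b1) 0 + min (d1 - c1) 0 + min (b2 - a2) 0 + min (c2 - b2) 0 + min (d2 - c2) 0 + min (b3 - a3) 0 + min (c3 - b3) 0 + min (d3 - c3) 0) + (min (a0 - b0) 0 + min (b0 - c0) 0 + min (c0 - d0) 0 + min (a1 - b1) 0 + min (b1 - c1) 0 + min (c1 - d1) 0 + min (a2 - b2) 0 + min (b2 - c2) 0 + min (c2 - d2) 0 + min (a3 - b3) 0 + min (b3 - c3) 0 + min (c3 - d3) 0)) = (min (b0 - a0) 0 + min (c0 - b0) 0 + min (d0 - c0) 0 + min (b1 - a1) 0 + min (c1 - b1) 0 + min (d1 - c1) 0 + min (b2 - a2) 0 + min (c2 - b2) 0 + min (d2 - c2) 0 + min (b3 - a3)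 0 + min (c3 - b3) 0 + min (d3 - c3) 0) + (min (a0 - b0) 0 + min (b0 - c0) 0 + min (c0 - d0) 0 + min (a1 - b1) 0 + min (b1 - c1) 0 + min (c1 - d1) 0 + min (a2 - b2) 0 + min (b2 - c2) 0 + min (c2 - d2) 0 + min (a3 - b3) 0 + min (b3 - c3) 0 + min (c3 - d3) 0) + |d0 - a0 + (d1 - a1 + (d2 - a2 + (d3 - a3)))| by ring]

-- ===== VERDICT (by name: the statement is the Claim_ definition above) =====
theorem calculate_monotonicity_spec : Claim_equal_calculate_monotonicity := by
  intro grid _hdom hpre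
  obtain ⟨hlen, hrows⟩ := hpre
  match grid, hlen with
  | (r0 :: r1 :: r2 :: r3 :: rest), _ =>
    have h0 := hrows r0 (by simp)
    have h1 := hrows r1 (by simp)
    have h2 := hrows r2 (by simp)
    have h3 := hrows r3 (by simp)
    match r0, h0 with
    | (a0 :: a1 :: a2 :: a3 :: ta), _ =>
    match r1, h1 with
    | (b0 :: b1 :: b2 :: b3 :: tb), _ =>
    match r2, h2 with
    | (c0 :: c1 :: c2 :: c3 :: tc), _ =>
    match r3, h3 with
    | (d0 :: d1 :: d2 :: d3 :: td), _ =>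
      exact main_eq a0 a1 a2 a3 b0 b1 b2 b3 c0 c1 c2 c3 d0 d1 d2 d3 ta tb tc td rest
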